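-- pv_equiv track=rewrite | github.com/gustavobastian/exercises-DASSOPG | class-1/Ejercicios_extras/6/6_3.py | replace_char
-- ===== SOURCE A (Python) =====
-- def replace_char(string, char,max):
--     s=""
--     count=0
--     for i in range (0, len(string)):
--         if (string[i] == " ")and (count<max):
--              s+= str(char)
--              count+=1
--         else : s+=string[i]
--     return s
-- ===== SOURCE B (Python) =====
-- def replace_char(string, char, max):
--     # split on single spaces, then rejoin: the first `max` gaps get str(char),
--     # the rest get their space back
--     parts = string.split(' ')
--     out = [parts[0]]
--     for i, tok in enumerate(parts[1:], 1):
--         out.append(str(char) if i <= max else ' ')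
--         out.append(tok)
--     return ''.join(out)
-- ===== Notes on version B (the rewrite author's own statement) =====
-- stated objective: faster
-- what changed: B splits the string on ' ' and rejoins the tokens with an indexed separator per gap (char for the first max gaps, a space afterwards) instead of A's per-character scan with a replacement counter and repeated string concatenation.
import Mathlib
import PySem

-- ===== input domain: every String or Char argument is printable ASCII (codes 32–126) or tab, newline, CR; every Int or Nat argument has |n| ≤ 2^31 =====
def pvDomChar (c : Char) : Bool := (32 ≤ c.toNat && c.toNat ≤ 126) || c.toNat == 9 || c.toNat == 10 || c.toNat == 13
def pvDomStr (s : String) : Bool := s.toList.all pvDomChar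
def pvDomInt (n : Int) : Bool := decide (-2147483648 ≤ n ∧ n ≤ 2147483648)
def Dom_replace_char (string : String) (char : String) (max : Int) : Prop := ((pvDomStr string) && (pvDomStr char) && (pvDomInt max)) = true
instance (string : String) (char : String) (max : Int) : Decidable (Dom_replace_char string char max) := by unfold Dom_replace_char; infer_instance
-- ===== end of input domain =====

-- B rebuilds the string from string.split(' ') with an indexed separator per gap
-- (char for the first `max` gaps, ' ' afterwards) instead of A's per-character scan
-- with a replacement counter; objective: more idiomatic decomposition, same values.

-- ===== PORT A =====
def replace_char (string : String) (char : String) (max : Int) : String :=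
  String.ofList
    (((PySem.List.pyRange 0 (PySem.Str.len string) 1).foldl
      (fun (st : List Char × Int) i =>
        if PySem.List.pyGetD string.toList i ' ' = ' ' ∧ st.2 < max then
          (st.1 ++ char.toList, st.2 + 1)
        else
          (st.1 ++ [PySem.List.pyGetD string.toList i ' '], st.2))
      ([], 0))).1

-- ===== PORT B =====
def replace_char_alt (string : String) (char : String) (max : Int) : String :=
  let parts := (PySem.Str.split? string " ").getD []
  let out := (PySem.List.enumerate (PySem.List.slice parts (some 1) none) 1).foldl
      (fun acc p => acc ++ [if p.1 ≤ max then char else " ", p.2])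
      [PySem.List.pyGetD parts 0 ""]
  PySem.Str.join "" out

-- ===== PRECONDITION & SPEC =====
def Spec_replace_char (string : String) (char : String) (max : Int) (out : String) : Prop := out = replace_char_alt string char max
instance (string : String) (char : String) (max : Int) (out : String) : Decidable (Spec_replace_char string char max out) := by unfold Spec_replace_char; infer_instance

-- ===== CLAIM (what is proved, stated in full; the proofs are below) =====
def Claim_equal_replace_char : Prop := ∀ (string : String) (char : String) (max : Int), Dom_replace_char string char max → Spec_replace_char string char max (replace_char string char max)

-- ===== LEMMAS AND PROOFS =====

-- simple recursive split on a single space (proved equal to PySem.Chars.splitOn _ [' '])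
def pvSp : List Char → List (List Char)
  | [] => [[]]
  | c :: t => if c = ' ' then [] :: pvSp t else
      match pvSp t with
      | [] => [[c]]
      | h :: r => (c :: h) :: r

def pvMapHead (f : List Char → List Char) : List (List Char) → List (List Char)
  | [] => []
  | h :: t => f h :: t

-- A's scan as a structural recursion
def pvAuxA (char : String) (max : Int) : List Char → Int → List Char
  | [], _ => []
  | c :: t, cnt =>
      if c = ' ' ∧ cnt < max then char.toList ++ pvAuxA char max t (cnt + 1)
      else c :: pvAuxA char max t cnt

-- B's separator/token segments, as strings and as one flat char list
def pvBsegs (char : String) (max : Int) : List String → Int → List String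
  | [], _ => []
  | p :: ps, i => (if i ≤ max then char else " ") :: p :: pvBsegs char max ps (i + 1)

def pvJn (char : String) (max : Int) : List (List Char) → Int → List Char
  | [], _ => []
  | p :: ps, i => (if i ≤ max then char.toList else [' ']) ++ p ++ pvJn char max ps (i + 1)

theorem pvSp_ne_nil (l : List Char) : pvSp l ≠ [] := by
  cases l with
  | nil => simp [pvSp]
  | cons c t =>
    simp only [pvSp]
    split_ifs
    · simp
    · rcases h : pvSp t with _ | ⟨h', r⟩ <;> simp

theorem pvGo_eq (fuel : Nat) (l cur : List Char) (acc : List (List Char))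
    (h : l.length ≤ fuel) :
    PySem.Chars.splitOn.go [' '] fuel l cur acc
      = acc.reverse ++ pvMapHead (cur.reverse ++ ·) (pvSp l) := by
  induction l generalizing fuel cur acc with
  | nil =>
    cases fuel <;> simp [PySem.Chars.splitOn.go, pvSp, pvMapHead]
  | cons c t ih =>
    cases fuel with
    | zero => simp at h
    | succ f =>
      by_cases hc : c = ' '
      · subst hc
        rw [show PySem.Chars.splitOn.go [' '] (f+1) (' ' :: t) cur acc
              = PySem.Chars.splitOn.go [' '] f t [] (cur.reverse :: acc) by
            simp [PySem.Chars.splitOn.go, List.isPrefixOf]]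
        rw [ih f [] (cur.reverse :: acc) (by simpa using h)]
        simp [pvSp, pvMapHead]
        rcases hs : pvSp t with _ | ⟨h', r⟩
        · exact absurd hs (pvSp_ne_nil t)
        · simp
      · rw [show PySem.Chars.splitOn.go [' '] (f+1) (c :: t) cur acc
              = PySem.Chars.splitOn.go [' '] f t (c :: cur) acc by
            simp [PySem.Chars.splitOn.go, List.isPrefixOf, Ne.symm hc]]
        rw [ih f (c :: cur) acc (by simpa using Nat.le_of_succ_le_succ h)]
        rcases hs : pvSp t with _ | ⟨h', r⟩
        · exact absurd hs (pvSp_ne_nil t)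
        · simp [pvSp, hc, hs, pvMapHead]

theorem pvSplitOn_space (l : List Char) :
    PySem.Chars.splitOn l [' '] = pvSp l := by
  rw [PySem.Chars.splitOn, pvGo_eq (l.length + 1) l [] [] (by omega)]
  rcases hs : pvSp l with _ | ⟨h', r⟩
  · exact absurd hs (pvSp_ne_nil l)
  · simp [pvMapHead]

theorem pvFoldlA (char : String) (max : Int) (l : List Char) (s : List Char) (cnt : Int) :
    (l.foldl
      (fun (st : List Char × Int) c =>
        if c = ' ' ∧ st.2 < max then (st.1 ++ char.toList, st.2 + 1)
        else (st.1 ++ [c], st.2))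
      (s, cnt)).1 = s ++ pvAuxA char max l cnt := by
  induction l generalizing s cnt with
  | nil => simp [pvAuxA]
  | cons c t ih =>
    simp only [List.foldl, pvAuxA]
    split_ifs with hc
    · rw [ih]; simp
    · rw [ih]; simp

theorem pvFoldlB (char : String) (max : Int) (ps : List String) (i : Int) (init : List String) :
    (PySem.List.enumerate ps i).foldl
        (fun acc p => acc ++ [if p.1 ≤ max then char else " ", p.2]) init
      = init ++ pvBsegs char max ps i := by
  induction ps generalizing i init with
  | nil => simp [PySem.List.enumerate, pvBsegs]
  | cons p t ih =>
    rw [PySem.List.enumerate_cons]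
    simp only [List.foldl, pvBsegs]
    rw [ih]
    simp

theorem pvJoin_nil (xs : List (List Char)) :
    PySem.Chars.join [] xs = xs.flatten := by
  simp [PySem.Chars.join, List.intercalate]
  induction xs with
  | nil => simp
  | cons h t ih =>
    cases t <;> simp_all [List.intersperse]

theorem pvFlat_bsegs (char : String) (max : Int) (ps : List String) (i : Int) :
    ((pvBsegs char max ps i).map String.toList).flatten
      = pvJn char max (ps.map String.toList) i := by
  induction ps generalizing i with
  | nil => simp [pvBsegs, pvJn]
  | cons p t ih =>
    simp only [pvBsegs, pvJn, List.map, List.flatten_cons] at *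
    simp [ih]
    split_ifs <;> simp

theorem pvMain (char : String) (max : Int) (l : List Char) (cnt i : Int)
    (hinv : i = cnt + 1 ∨ (max ≤ cnt ∧ max < i)) :
    pvAuxA char max l cnt = (pvSp l).headI ++ pvJn char max (pvSp l).tail i := by
  induction l generalizing cnt i with
  | nil => simp [pvAuxA, pvSp, pvJn]
  | cons c t ih =>
    by_cases hc : c = ' '
    · subst hc
      rcases hs : pvSp t with _ | ⟨h', r⟩
      · exact absurd hs (pvSp_ne_nil t)
      · by_cases hm : cnt < max
        · have hi : i ≤ max := by rcases hinv with h | h <;> omega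
          rw [show pvAuxA char max (' ' :: t) cnt
                = char.toList ++ pvAuxA char max t (cnt + 1) by simp [pvAuxA, hm]]
          rw [ih (cnt + 1) (i + 1) (by omega)]
          simp [pvSp, hs, pvJn, hi]
        · have hi : ¬ i ≤ max := by rcases hinv with h | h <;> omega
          rw [show pvAuxA char max (' ' :: t) cnt
                = ' ' :: pvAuxA char max t cnt by simp [pvAuxA, hm]]
          rw [ih cnt (i + 1) (by right; omega)]
          simp [pvSp, hs, pvJn, hi]
    · rcases hs : pvSp t with _ | ⟨h', r⟩
      · exact absurd hs (pvSp_ne_nil t)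
      · rw [show pvAuxA char max (c :: t) cnt = c :: pvAuxA char max t cnt by
            simp [pvAuxA, hc]]
        rw [ih cnt i hinv]
        simp [pvSp, hc, hs]

-- ===== VERDICT (by name: the statement is the Claim_ definition above) =====
theorem replace_char_spec : Claim_equal_replace_char := by
  intro string char max _
  unfold Spec_replace_char replace_char replace_char_alt
  -- A side: reduce the indexed foldl to the structural scan
  rw [PySem.Str.len_eq]
  rw [show ((string.toList.length : Int)) = PySem.List.len string.toList by
      simp [PySem.List.len]]
  rw [PySem.List.foldl_pyRange_zero_pyGetD string.toList ' '
      (fun (st : List Char × Int) c =>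
        if c = ' ' ∧ st.2 < max then (st.1 ++ char.toList, st.2 + 1)
        else (st.1 ++ [c], st.2)) ([], 0)]
  rw [pvFoldlA]
  -- B side: split, slice, enumerate, join
  have hsplit : PySem.Str.split? string " " = some ((pvSp string.toList).map String.ofList) := by
    simp [PySem.Str.split?, PySem.Chars.split?, pvSplitOn_space]
  rw [hsplit]
  rcases hs : pvSp string.toList with _ | ⟨h', r⟩
  · exact absurd hs (pvSp_ne_nil string.toList)
  · simp only [Option.getD_some, List.map]
    rw [PySem.List.slice_from _ (by norm_num)]
    simp only [Int.toNat_one, List.drop_one, List.tail_cons]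
    rw [pvFoldlB]
    rw [pvMain char max string.toList 0 1 (by left; rfl)]
    rw [PySem.Str.join]
    have hget : PySem.List.pyGetD (String.ofList h' :: List.map String.ofList r) 0 ""
        = String.ofList h' := by
      simp [PySem.List.pyGetD]
    rw [hget, hs, show ("".toList) = ([] : List Char) from rfl, pvJoin_nil]
    simp [pvFlat_bsegs, List.map_map, Function.comp_def]
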